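-- pv_equiv track=rewrite | github.com/ballsona/Algorithm | Programmers.py/Lv2-석유 시추.py | solution
-- ===== SOURCE A (Python) =====
-- def solution(land):
--     n, m = len(land), len(land[0])
--     visited = [[False]*m for i in range(n)]
--     widths = [0]*m
--
--     # 영역 너비 + 정보 구하기
--     def search(x,y):
--         area = 0
--         stack = [(x,y)]
--         coords = []
--         visited[x][y] = True
--
--         while len(stack) > 0:
--             (tx, ty) = stack.pop()
--             coords.append(ty)
--             area += 1
--             if tx < n-1 and not visited[tx+1][ty] and land[tx+1][ty] == 1:
--                 stack.append((tx+1,ty))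
--                 visited[tx+1][ty] = True
--             if ty < m-1 and not visited[tx][ty+1] and land[tx][ty+1] == 1:
--                 stack.append((tx,ty+1))
--                 visited[tx][ty+1] = True
--         return (area, list(set(coords)))
--
--     # 탐색
--     for i in range(n):
--         for j in range(m):
--             if land[i][j] == 1 and not visited[i][j]:
--                 a, l = search(i,j)
--                 for idx in l:
--                     widths[idx] += a
--
--     # 석유량 최댓값
--     return max(widths)
-- ===== SOURCE B (Python) =====
-- def solution(land):
--     # One row-major DP pass: each land cell's component is identified by the
--     # row-major-minimal cell that reaches it via down/right moves; no stack, no flood fill.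
--     n, m = len(land), len(land[0])
--     own = {}            # (i, j) -> owner id (row-major id of the component's seed)
--     size = {}           # owner id -> component cell count
--     for i in range(n):
--         for j in range(m):
--             if land[i][j] == 1:
--                 o = i * m + j
--                 if i > 0 and (i - 1, j) in own and own[(i - 1, j)] < o:
--                     o = own[(i - 1, j)]
--                 if j > 0 and (i, j - 1) in own and own[(i, j - 1)] < o:
--                     o = own[(i, j - 1)]
--                 own[(i, j)] = o
--                 size[o] = size.get(o, 0) + 1
--     best = 0
--     for j in range(m):
--         owners = {own[(i, j)] for i in range(n) if (i, j) in own}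
--         best = max(best, sum(size[o] for o in owners))
--     return best
-- ===== Notes on version B (the rewrite author's own statement) =====
-- stated objective: alternative
-- what changed: A runs an explicit-stack flood fill (down/right moves) from each unvisited cell with a shared visited matrix; B does no search at all: one row-major DP pass computes each land cell's component owner (the row-major-minimal cell reaching it via down/right moves) from its up/left neighbours, tallying component sizes and per-column owner sets.
-- outside the precondition, e.g. on solution([]): A raises IndexError, B raises IndexError; on solution([[]]): A raises ValueError, B returns 0; on solution([[1, 1], [1]]): A raises IndexError, B raises IndexError
import Mathlib
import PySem

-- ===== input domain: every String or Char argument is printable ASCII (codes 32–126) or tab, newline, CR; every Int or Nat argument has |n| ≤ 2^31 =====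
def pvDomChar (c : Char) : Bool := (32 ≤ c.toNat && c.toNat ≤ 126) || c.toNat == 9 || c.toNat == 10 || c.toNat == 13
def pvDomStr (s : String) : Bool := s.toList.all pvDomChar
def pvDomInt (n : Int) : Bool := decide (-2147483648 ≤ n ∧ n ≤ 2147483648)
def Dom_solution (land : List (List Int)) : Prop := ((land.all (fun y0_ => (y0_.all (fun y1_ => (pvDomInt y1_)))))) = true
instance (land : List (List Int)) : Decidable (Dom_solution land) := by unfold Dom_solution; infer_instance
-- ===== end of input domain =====

-- B replaces A's explicit-stack flood fill by a single row-major DP pass: since the fill only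
-- moves down/right, each land cell's component is identified by the row-major-minimal cell that
-- reaches it, computable from the up/left neighbours; objective: alternative (no speed claim).

-- ===== PORT A =====
-- land[i][j]; under Pre_ every access A performs is in range, so the default is never returned
def pvGrid (land : List (List Int)) (i j : ℕ) : Int := (land.getD i []).getD j 0

-- the while-loop of `search`; the visited matrix is carried as the set of True cells; fuel
-- 2*n*m+1 is an upper bound on the iterations (proved unreachable in `pvLoop_spec` below)
def pvSearchLoop (land : List (List Int)) (n m : ℕ) :
    ℕ → List (ℕ × ℕ) → Finset (ℕ × ℕ) → ℕ → List ℕ → ℕ × List ℕ × Finset (ℕ × ℕ)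
  | 0, _, vis, area, coords => (area, coords, vis)
  | _ + 1, [], vis, area, coords => (area, coords, vis)
  | f + 1, (tx, ty) :: rest, vis, area, coords =>
    let s1 : List (ℕ × ℕ) × Finset (ℕ × ℕ) :=
      if tx < n - 1 ∧ (tx + 1, ty) ∉ vis ∧ pvGrid land (tx + 1) ty = 1 then
        ((tx + 1, ty) :: rest, insert (tx + 1, ty) vis)
      else (rest, vis)
    let s2 : List (ℕ × ℕ) × Finset (ℕ × ℕ) :=
      if ty < m - 1 ∧ (tx, ty + 1) ∉ s1.2 ∧ pvGrid land tx (ty + 1) = 1 then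
        ((tx, ty + 1) :: s1.1, insert (tx, ty + 1) s1.2)
      else s1
    pvSearchLoop land n m f s2.1 s2.2 (area + 1) (coords ++ [ty])

def pvSearch (land : List (List Int)) (n m x y : ℕ) (vis : Finset (ℕ × ℕ)) :
    ℕ × List ℕ × Finset (ℕ × ℕ) :=
  pvSearchLoop land n m (2 * n * m + 1) [(x, y)] (insert (x, y) vis) 0 []

-- body of the double scan loop; `list(set(coords))` is PySem.Set.ofList (the widths updates
-- commute, so Python's set iteration order cannot influence the result)
def pvScanStep (land : List (List Int)) (n m : ℕ)
    (st : Finset (ℕ × ℕ) × List ℕ) (i j : ℕ) : Finset (ℕ × ℕ) × List ℕ :=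
  if pvGrid land i j = 1 ∧ (i, j) ∉ st.1 then
    let r := pvSearch land n m i j st.1
    (r.2.2, (PySem.Set.ofList r.2.1).foldl (fun w idx => w.set idx (w.getD idx 0 + r.1)) st.2)
  else st

-- max(widths): the entries are counts (ℕ), so folding max from 0 is Python's max on Pre_ (m ≥ 1)
def solution (land : List (List Int)) : Int :=
  let n := land.length
  let m := (land.getD 0 []).length
  let fin := (List.range n).foldl
      (fun st i => (List.range m).foldl (fun st j => pvScanStep land n m st i j) st)
      ((∅ : Finset (ℕ × ℕ)), List.replicate m 0)
  ((fin.2.foldl max 0 : ℕ) : Int)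

-- ===== PORT B =====
-- one cell of B's DP pass: own/(i,j) dict lookups exactly as Source B ('(i-1,j) in own and own[..] < o')
def pvAltCell (land : List (List Int)) (m : ℕ)
    (st : PySem.Dict (ℕ × ℕ) ℕ × PySem.Dict ℕ ℕ) (i j : ℕ) :
    PySem.Dict (ℕ × ℕ) ℕ × PySem.Dict ℕ ℕ :=
  if pvGrid land i j = 1 then
    let o0 := i * m + j
    let o1 := if 0 < i then
        match st.1.get? (i - 1, j) with
        | some v => if v < o0 then v else o0
        | none => o0
      else o0
    let o2 := if 0 < j then
        match st.1.get? (i, j - 1) with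
        | some v => if v < o1 then v else o1
        | none => o1
      else o1
    (st.1.insert (i, j) o2, st.2.insert o2 (st.2.getD o2 0 + 1))
  else st

-- the `sum` over the owner set and `max` consume the set order-insensitively;
-- size[o] is always present when looked up, so getD 0 is exact here
def solution_alt (land : List (List Int)) : Int :=
  let n := land.length
  let m := (land.getD 0 []).length
  let os := (List.range n).foldl
      (fun st i => (List.range m).foldl (fun st j => pvAltCell land m st i j) st)
      (PySem.Dict.empty, PySem.Dict.empty)
  let best := (List.range m).foldl (fun best j =>
      let owners : PySem.Set ℕ :=
        PySem.Set.ofList ((List.range n).filterMap (fun i => os.1.get? (i, j)))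
      max best ((owners.map (fun o => os.2.getD o 0)).sum)) 0
  (best : Int)

-- ===== PRECONDITION & SPEC =====
-- Pre_ = exactly the inputs where Python A returns: a nonempty grid, a nonempty first row
-- (else len(land[0])/max(widths) raise), and no row shorter than the first (else land[i][j] raises)
def Pre_solution (land : List (List Int)) : Prop :=
  land ≠ [] ∧ 0 < (land.getD 0 []).length ∧
    ∀ row ∈ land, (land.getD 0 []).length ≤ row.length
instance (land : List (List Int)) : Decidable (Pre_solution land) := by
  unfold Pre_solution; infer_instance

def pvWitness_solution : List (List Int) := [[1, 0, 1], [1, 1, 1]]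

def Spec_solution (land : List (List Int)) (out : Int) : Prop := out = solution_alt land
instance (land : List (List Int)) (out : Int) : Decidable (Spec_solution land out) := by
  unfold Spec_solution; infer_instance

-- ===== CLAIM (what is proved, stated in full; the proofs are below) =====
def Claim_equal_solution : Prop :=
  ∀ (land : List (List Int)), Dom_solution land → Pre_solution land →
    Spec_solution land (solution land)

-- ===== LEMMAS AND PROOFS =====
def pvOwn (land : List (List Int)) (m : ℕ) : ℕ → ℕ → ℕ
  | i, j =>
    let o0 := i * m + j
    let o1 := if h : 0 < i then
        (if pvGrid land (i - 1) j = 1 ∧ pvOwn land m (i - 1) j < o0 then pvOwn land m (i - 1) j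
         else o0)
      else o0
    if h : 0 < j then
      (if pvGrid land i (j - 1) = 1 ∧ pvOwn land m i (j - 1) < o1 then pvOwn land m i (j - 1)
       else o1)
    else o1
  termination_by i j => i + j
  decreasing_by all_goals omega

lemma idc_inj (m : ℕ) {c d : ℕ × ℕ} (hc : c.2 < m) (hd : d.2 < m)
    (h : c.1 * m + c.2 = d.1 * m + d.2) : c = d := by
  obtain ⟨a, b⟩ := c; obtain ⟨x, y⟩ := d
  simp only at hc hd h ⊢
  have hax : a = x := by
    rcases Nat.lt_trichotomy a x with h1 | h1 | h1
    · exfalso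
      have e1 : a * m + b < a * m + m := by omega
      have e2 : a * m + m = (a + 1) * m := by ring
      have e3 : (a + 1) * m ≤ x * m := Nat.mul_le_mul_right m h1
      omega
    · exact h1
    · exfalso
      have e1 : x * m + y < x * m + m := by omega
      have e2 : x * m + m = (x + 1) * m := by ring
      have e3 : (x + 1) * m ≤ a * m := Nat.mul_le_mul_right m h1
      omega
  subst hax
  have : b = y := by omega
  subst this; rfl

lemma pvOwn_le_id (land : List (List Int)) (m i j : ℕ) :
    pvOwn land m i j ≤ i * m + j := by
  rw [pvOwn]; split_ifs <;> omega

lemma pvOwn_le_up (land : List (List Int)) (m i j : ℕ) (hi : 0 < i)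
    (hg : pvGrid land (i - 1) j = 1) : pvOwn land m i j ≤ pvOwn land m (i - 1) j := by
  conv_lhs => rw [pvOwn]
  simp only [hi, hg, dif_pos, true_and]
  split_ifs <;> omega

lemma pvOwn_le_left (land : List (List Int)) (m i j : ℕ) (hj : 0 < j)
    (hg : pvGrid land i (j - 1) = 1) : pvOwn land m i j ≤ pvOwn land m i (j - 1) := by
  conv_lhs => rw [pvOwn]
  simp only [hj, hg, dif_pos, true_and]
  split_ifs <;> omega

lemma pvOwn_cases (land : List (List Int)) (m i j : ℕ) :
    pvOwn land m i j = i * m + j ∨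
    (0 < i ∧ pvGrid land (i - 1) j = 1 ∧ pvOwn land m i j = pvOwn land m (i - 1) j) ∨
    (0 < j ∧ pvGrid land i (j - 1) = 1 ∧ pvOwn land m i j = pvOwn land m i (j - 1)) := by
  rw [pvOwn]
  by_cases hi : 0 < i <;> by_cases hj : 0 < j <;>
      simp only [hi, hj, dif_pos, dif_neg, not_false_iff] <;>
    first
      | (split_ifs with h1 h2 <;> tauto)
      | (split_ifs with h1 <;> tauto)
      | tauto

def gOne (land : List (List Int)) (n m : ℕ) (c : ℕ × ℕ) : Prop :=
  c.1 < n ∧ c.2 < m ∧ pvGrid land c.1 c.2 = 1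
def gStep (land : List (List Int)) (n m : ℕ) (c d : ℕ × ℕ) : Prop :=
  gOne land n m c ∧ gOne land n m d ∧ (d = (c.1 + 1, c.2) ∨ d = (c.1, c.2 + 1))
def gReach (land : List (List Int)) (n m : ℕ) (s c : ℕ × ℕ) : Prop :=
  gOne land n m s ∧ gOne land n m c ∧ Relation.ReflTransGen (gStep land n m) s c

lemma reach_exists (land : List (List Int)) (n m : ℕ) (c : ℕ × ℕ) (hc : gOne land n m c) :
    ∃ s, gReach land n m s c ∧ s.1 * m + s.2 = pvOwn land m c.1 c.2 := by
  obtain ⟨i, j⟩ := c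
  induction hk : i + j using Nat.strong_induction_on generalizing i j with
  | _ k IH =>
  subst hk
  obtain ⟨hin, hjm, hg1⟩ := hc
  rcases pvOwn_cases land m i j with h | ⟨hi, hg, h⟩ | ⟨hj, hg, h⟩
  · exact ⟨(i, j), ⟨⟨hin, hjm, hg1⟩, ⟨hin, hjm, hg1⟩, Relation.ReflTransGen.refl⟩, h.symm⟩
  · have hup : gOne land n m (i - 1, j) := ⟨by simp; omega, by simpa using hjm, hg⟩
    obtain ⟨s, hs, hid⟩ := IH ((i - 1) + j) (by omega) (i - 1) j hup rfl
    have hstep : gStep land n m (i - 1, j) (i, j) :=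
      ⟨hup, ⟨hin, hjm, hg1⟩, Or.inl (by simp; omega)⟩
    exact ⟨s, ⟨hs.1, ⟨hin, hjm, hg1⟩, hs.2.2.tail hstep⟩, by rw [hid, ← h]⟩
  · have hlf : gOne land n m (i, j - 1) := ⟨by simpa using hin, by simp; omega, hg⟩
    obtain ⟨s, hs, hid⟩ := IH (i + (j - 1)) (by omega) i (j - 1) hlf rfl
    have hstep : gStep land n m (i, j - 1) (i, j) :=
      ⟨hlf, ⟨hin, hjm, hg1⟩, Or.inr (by simp; omega)⟩
    exact ⟨s, ⟨hs.1, ⟨hin, hjm, hg1⟩, hs.2.2.tail hstep⟩, by rw [hid, ← h]⟩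

lemma reach_lb' (land : List (List Int)) (n m : ℕ) (s : ℕ × ℕ) (i j : ℕ)
    (h : gReach land n m s (i, j)) : pvOwn land m i j ≤ s.1 * m + s.2 := by
  induction hk : i + j using Nat.strong_induction_on generalizing i j with
  | _ k IH =>
  subst hk
  rcases Relation.ReflTransGen.cases_tail h.2.2 with heq | ⟨p, hsp, hpc⟩
  · rw [← heq]; simpa using pvOwn_le_id land m i j
  · obtain ⟨pi, pj⟩ := p
    obtain ⟨hp1, hp2, hd⟩ := hpc
    rcases hd with hd | hd
    · have e1 : i = pi + 1 := by simpa using congrArg Prod.fst hd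
      have e2 : j = pj := by simpa using congrArg Prod.snd hd
      have hIH := IH (pi + pj) (by omega) pi pj ⟨h.1, hp1, hsp⟩ rfl
      have hg : pvGrid land (i - 1) j = 1 := by
        rw [show i - 1 = pi by omega, e2]; exact hp1.2.2
      have hle := pvOwn_le_up land m i j (by omega) hg
      have e3 : pvOwn land m (i - 1) j = pvOwn land m pi pj := by
        rw [show i - 1 = pi by omega, e2]
      omega
    · have e1 : i = pi := by simpa using congrArg Prod.fst hd
      have e2 : j = pj + 1 := by simpa using congrArg Prod.snd hd
      have hIH := IH (pi + pj) (by omega) pi pj ⟨h.1, hp1, hsp⟩ rfl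
      have hg : pvGrid land i (j - 1) = 1 := by
        rw [show j - 1 = pj by omega, e1]; exact hp1.2.2
      have hle := pvOwn_le_left land m i j (by omega) hg
      have e3 : pvOwn land m i (j - 1) = pvOwn land m pi pj := by
        rw [show j - 1 = pj by omega, e1]
      omega

lemma reach_lb (land : List (List Int)) (n m : ℕ) (s c : ℕ × ℕ) (h : gReach land n m s c) :
    pvOwn land m c.1 c.2 ≤ s.1 * m + s.2 := by
  obtain ⟨i, j⟩ := c
  exact reach_lb' land n m s i j h

lemma reach_trans (land : List (List Int)) (n m : ℕ) {s c d : ℕ × ℕ}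
    (h1 : gReach land n m s c) (h2 : gReach land n m c d) : gReach land n m s d :=
  ⟨h1.1, h2.2.1, h1.2.2.trans h2.2.2⟩

lemma seed_exists (land : List (List Int)) (n m : ℕ) (c : ℕ × ℕ) (hc : gOne land n m c) :
    ∃ s, gReach land n m s c ∧ s.1 * m + s.2 = pvOwn land m c.1 c.2 ∧
      pvOwn land m s.1 s.2 = s.1 * m + s.2 := by
  obtain ⟨s, hs, hid⟩ := reach_exists land n m c hc
  refine ⟨s, hs, hid, ?_⟩
  have h1 : pvOwn land m s.1 s.2 ≤ s.1 * m + s.2 := pvOwn_le_id land m s.1 s.2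
  rcases Nat.lt_or_ge (pvOwn land m s.1 s.2) (s.1 * m + s.2) with hlt | hge
  · exfalso
    obtain ⟨s', hs', hid'⟩ := reach_exists land n m s hs.1
    have := reach_lb land n m s' c (reach_trans land n m hs' hs)
    omega
  · omega

lemma fiber_path (land : List (List Int)) (n m : ℕ) {t p c : ℕ × ℕ}
    (h1 : gReach land n m t p) (h2 : gReach land n m p c)
    (ht : t.1 * m + t.2 = pvOwn land m c.1 c.2) :
    pvOwn land m p.1 p.2 = pvOwn land m c.1 c.2 := by
  have hub : pvOwn land m p.1 p.2 ≤ pvOwn land m c.1 c.2 := ht ▸ reach_lb land n m t p h1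
  obtain ⟨s, hs, hid⟩ := reach_exists land n m p h1.2.1
  have := reach_lb land n m s c (reach_trans land n m hs h2)
  omega

def gridCells (n m : ℕ) : Finset (ℕ × ℕ) := Finset.range n ×ˢ Finset.range m
def fiber (land : List (List Int)) (n m o : ℕ) : Finset (ℕ × ℕ) :=
  (gridCells n m).filter (fun c => pvGrid land c.1 c.2 = 1 ∧ pvOwn land m c.1 c.2 = o)
def visSet (land : List (List Int)) (n m T : ℕ) : Finset (ℕ × ℕ) :=
  (gridCells n m).filter (fun c => pvGrid land c.1 c.2 = 1 ∧ pvOwn land m c.1 c.2 < T)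
def ownersCol (land : List (List Int)) (n m j : ℕ) : Finset ℕ :=
  ((gridCells n m).filter (fun c => c.2 = j ∧ pvGrid land c.1 c.2 = 1)).image
    (fun c => pvOwn land m c.1 c.2)
def colSum (land : List (List Int)) (n m T j : ℕ) : ℕ :=
  ∑ o ∈ (ownersCol land n m j).filter (· < T), (fiber land n m o).card

lemma mem_fiber (land : List (List Int)) (n m o : ℕ) (c : ℕ × ℕ) :
    c ∈ fiber land n m o ↔
      (c.1 < n ∧ c.2 < m ∧ pvGrid land c.1 c.2 = 1 ∧ pvOwn land m c.1 c.2 = o) := by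
  simp [fiber, gridCells, and_assoc]

lemma mem_visSet (land : List (List Int)) (n m T : ℕ) (c : ℕ × ℕ) :
    c ∈ visSet land n m T ↔
      (c.1 < n ∧ c.2 < m ∧ pvGrid land c.1 c.2 = 1 ∧ pvOwn land m c.1 c.2 < T) := by
  simp [visSet, gridCells, and_assoc]

lemma visSet_succ (land : List (List Int)) (n m T : ℕ) :
    visSet land n m (T + 1) = visSet land n m T ∪ fiber land n m T := by
  ext c
  simp only [mem_visSet, mem_fiber, Finset.mem_union]
  constructor
  · rintro ⟨h1, h2, h3, h4⟩
    rcases Nat.lt_or_ge (pvOwn land m c.1 c.2) T with h | h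
    · exact Or.inl ⟨h1, h2, h3, h⟩
    · exact Or.inr ⟨h1, h2, h3, by omega⟩
  · rintro (⟨h1, h2, h3, h4⟩ | ⟨h1, h2, h3, h4⟩)
    · exact ⟨h1, h2, h3, by omega⟩
    · exact ⟨h1, h2, h3, by omega⟩

lemma fiber_id_empty (land : List (List Int)) (n m i j : ℕ) (hi : i < n) (hj : j < m)
    (h : ¬(pvGrid land i j = 1 ∧ pvOwn land m i j = i * m + j)) :
    fiber land n m (i * m + j) = ∅ := by
  rw [Finset.eq_empty_iff_forall_notMem]
  intro c hc
  rw [mem_fiber] at hc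
  obtain ⟨h1, h2, h3, h4⟩ := hc
  obtain ⟨s, hs, hid, hself⟩ := seed_exists land n m c ⟨h1, h2, h3⟩
  have hsij : s = (i, j) := idc_inj m hs.1.2.1 hj (by rw [hid, h4])
  apply h
  have hg := hs.1.2.2
  have ho := hself
  rw [hsij] at hg ho
  exact ⟨hg, ho⟩

lemma step_mono (land : List (List Int)) (n m : ℕ) {c d : ℕ × ℕ}
    (h : gStep land n m c d) : pvOwn land m d.1 d.2 ≤ pvOwn land m c.1 c.2 := by
  obtain ⟨s, hs, hid⟩ := reach_exists land n m c h.1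
  have : gReach land n m s d := ⟨hs.1, h.2.1, hs.2.2.tail h⟩
  have := reach_lb land n m s d this
  omega

-- a pop-closed popped set containing the seed covers the whole fiber
lemma popped_complete (land : List (List Int)) (n m : ℕ) (t : ℕ × ℕ)
    (ht : gOne land n m t) (hts : pvOwn land m t.1 t.2 = t.1 * m + t.2)
    (P : Finset (ℕ × ℕ)) (hP : P ⊆ fiber land n m (t.1 * m + t.2))
    (hclosed : ∀ c ∈ P, ∀ d, gStep land n m c d →
      d ∉ visSet land n m (t.1 * m + t.2) → d ∈ P)
    (htP : t ∈ P) : P = fiber land n m (t.1 * m + t.2) := by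
  apply Finset.Subset.antisymm hP
  intro c hc
  rw [mem_fiber] at hc
  obtain ⟨h1, h2, h3, h4⟩ := hc
  obtain ⟨s, hs, hid, hself⟩ := seed_exists land n m c ⟨h1, h2, h3⟩
  have hst : s = t := idc_inj m hs.1.2.1 ht.2.1 (by rw [hid, h4])
  rw [hst] at hs
  -- path induction along the reach from t to c
  have key : ∀ c' : ℕ × ℕ, Relation.ReflTransGen (gStep land n m) t c' →
      pvOwn land m c'.1 c'.2 = t.1 * m + t.2 → c' ∈ P := by
    intro c' hrtg
    induction hrtg with
    | refl => intro _; exact htP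
    | @tail p q hpath hstep ih =>
      intro hq
      have hpP : p ∈ P := by
        apply ih
        rw [← hq]
        exact fiber_path land n m ⟨ht, hstep.1, hpath⟩
          ⟨hstep.1, hstep.2.1, Relation.ReflTransGen.single hstep⟩ hq.symm
      have hqnv : q ∉ visSet land n m (t.1 * m + t.2) := by
        rw [mem_visSet]; rintro ⟨_, _, _, hlt⟩; omega
      exact hclosed p hpP q hstep hqnv
  exact key c hs.2.2 (by omega)

-- one pop step of the loop: pops c, pushes the fresh neighbours L, then the IH applies
set_option maxHeartbeats 1000000 in
lemma loop_push (land : List (List Int)) (n m : ℕ) (t : ℕ × ℕ)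
    (ht : gOne land n m t) (hts : pvOwn land m t.1 t.2 = t.1 * m + t.2) (f : ℕ)
    (IH : ∀ (stack : List (ℕ × ℕ)) (P : Finset (ℕ × ℕ)) (area : ℕ) (coords : List ℕ),
      stack.Nodup →
      (∀ c ∈ stack, c ∈ fiber land n m (t.1 * m + t.2) ∧ c ∉ P) →
      P ⊆ fiber land n m (t.1 * m + t.2) →
      (∀ c ∈ P, ∀ d, gStep land n m c d → d ∉ visSet land n m (t.1 * m + t.2) →
        d ∈ P ∨ d ∈ stack) →
      (t ∈ P ∨ t ∈ stack) →
      stack.length + 2 * ((fiber land n m (t.1 * m + t.2) \ (P ∪ stack.toFinset)).card) ≤ f →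
      ∃ cl, pvSearchLoop land n m f stack
          (visSet land n m (t.1 * m + t.2) ∪ P ∪ stack.toFinset) area coords
          = (area + ((fiber land n m (t.1 * m + t.2)).card - P.card), cl,
             visSet land n m (t.1 * m + t.2) ∪ fiber land n m (t.1 * m + t.2))
        ∧ cl.toFinset = coords.toFinset ∪ (fiber land n m (t.1 * m + t.2) \ P).image Prod.snd)
    (tx ty : ℕ) (rest : List (ℕ × ℕ)) (P : Finset (ℕ × ℕ)) (area : ℕ) (coords : List ℕ)
    (L : List (ℕ × ℕ))
    (hnd : ((tx, ty) :: rest).Nodup)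
    (hstk : ∀ c ∈ (tx, ty) :: rest, c ∈ fiber land n m (t.1 * m + t.2) ∧ c ∉ P)
    (hP : P ⊆ fiber land n m (t.1 * m + t.2))
    (hclosed : ∀ c ∈ P, ∀ d, gStep land n m c d → d ∉ visSet land n m (t.1 * m + t.2) →
      d ∈ P ∨ d ∈ (tx, ty) :: rest)
    (ht0 : t ∈ P ∨ t ∈ (tx, ty) :: rest)
    (hfuel : ((tx, ty) :: rest).length +
      2 * ((fiber land n m (t.1 * m + t.2) \ (P ∪ ((tx, ty) :: rest).toFinset)).card) ≤ f + 1)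
    (hLfib : ∀ d ∈ L, d ∈ fiber land n m (t.1 * m + t.2))
    (hLnv : ∀ d ∈ L, d ∉ visSet land n m (t.1 * m + t.2) ∪ P ∪ ((tx, ty) :: rest).toFinset)
    (hLnd : L.Nodup)
    (hLcomp : ∀ d, gStep land n m (tx, ty) d → d ∉ visSet land n m (t.1 * m + t.2) →
      d ∈ visSet land n m (t.1 * m + t.2) ∪ P ∪ ((tx, ty) :: rest).toFinset ∨ d ∈ L) :
    ∃ cl, pvSearchLoop land n m f (L ++ rest)
        (visSet land n m (t.1 * m + t.2) ∪ insert (tx, ty) P ∪ (L ++ rest).toFinset)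
        (area + 1) (coords ++ [ty])
        = (area + ((fiber land n m (t.1 * m + t.2)).card - P.card), cl,
           visSet land n m (t.1 * m + t.2) ∪ fiber land n m (t.1 * m + t.2))
      ∧ cl.toFinset = coords.toFinset ∪
          (fiber land n m (t.1 * m + t.2) \ P).image Prod.snd := by
  obtain ⟨hcf, hcP⟩ := hstk (tx, ty) (List.mem_cons_self)
  have hcU : (tx, ty) ∈ visSet land n m (t.1 * m + t.2) ∪ P ∪ ((tx, ty) :: rest).toFinset := by
    simp
  have hrestU : ∀ e ∈ rest,
      e ∈ visSet land n m (t.1 * m + t.2) ∪ P ∪ ((tx, ty) :: rest).toFinset := by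
    intro e he; simp [he]
  have hPU : ∀ e ∈ P,
      e ∈ visSet land n m (t.1 * m + t.2) ∪ P ∪ ((tx, ty) :: rest).toFinset := by
    intro e he; simp [he]
  have hcnr : (tx, ty) ∉ rest := (List.nodup_cons.mp hnd).1
  -- the six hypotheses of the IH at the pushed state
  have h1' : (L ++ rest).Nodup := by
    rw [List.nodup_append]
    refine ⟨hLnd, (List.nodup_cons.mp hnd).2, ?_⟩
    intro a ha b hb heq
    exact (hLnv a ha) (heq ▸ hrestU b hb)
  have h2' : ∀ e ∈ L ++ rest,
      e ∈ fiber land n m (t.1 * m + t.2) ∧ e ∉ insert (tx, ty) P := by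
    intro e he
    rcases List.mem_append.mp he with he | he
    · refine ⟨hLfib e he, ?_⟩
      intro hmem
      rcases Finset.mem_insert.mp hmem with hec | hmem
      · exact (hLnv e he) (hec ▸ hcU)
      · exact (hLnv e he) (hPU e hmem)
    · obtain ⟨hf, hp⟩ := hstk e (List.mem_cons_of_mem _ he)
      refine ⟨hf, ?_⟩
      intro hmem
      rcases Finset.mem_insert.mp hmem with hec | hmem
      · exact hcnr (hec ▸ he)
      · exact hp hmem
  have h3' : insert (tx, ty) P ⊆ fiber land n m (t.1 * m + t.2) :=
    Finset.insert_subset hcf hP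
  have h4' : ∀ e ∈ insert (tx, ty) P, ∀ d, gStep land n m e d →
      d ∉ visSet land n m (t.1 * m + t.2) → d ∈ insert (tx, ty) P ∨ d ∈ L ++ rest := by
    intro e he d hstep hdnv
    rcases Finset.mem_insert.mp he with rfl | he
    · rcases hLcomp d hstep hdnv with hd | hd
      · rcases Finset.mem_union.mp hd with hd | hd
        · rcases Finset.mem_union.mp hd with hd | hd
          · exact absurd hd hdnv
          · exact Or.inl (Finset.mem_insert_of_mem hd)
        · rcases List.mem_cons.mp (List.mem_toFinset.mp hd) with hdc | hd
          · exact Or.inl (hdc ▸ Finset.mem_insert_self _ _)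
          · exact Or.inr (List.mem_append.mpr (Or.inr hd))
      · exact Or.inr (List.mem_append.mpr (Or.inl hd))
    · rcases hclosed e he d hstep hdnv with hd | hd
      · exact Or.inl (Finset.mem_insert_of_mem hd)
      · rcases List.mem_cons.mp hd with hdc | hd
        · exact Or.inl (hdc ▸ Finset.mem_insert_self _ _)
        · exact Or.inr (List.mem_append.mpr (Or.inr hd))
  have h5' : t ∈ insert (tx, ty) P ∨ t ∈ L ++ rest := by
    rcases ht0 with h | h
    · exact Or.inl (Finset.mem_insert_of_mem h)
    · rcases List.mem_cons.mp h with hc | h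
      · exact Or.inl (hc ▸ Finset.mem_insert_self _ _)
      · exact Or.inr (List.mem_append.mpr (Or.inr h))
  have hLsub : L.toFinset ⊆
      fiber land n m (t.1 * m + t.2) \ (P ∪ ((tx, ty) :: rest).toFinset) := by
    intro d hd
    rw [List.mem_toFinset] at hd
    rw [Finset.mem_sdiff]
    refine ⟨hLfib d hd, fun hmem => (hLnv d hd) ?_⟩
    rcases Finset.mem_union.mp hmem with h | h
    · exact Finset.mem_union_left _ (Finset.mem_union_right _ h)
    · exact Finset.mem_union_right _ h
  have hMeq : fiber land n m (t.1 * m + t.2) \ (insert (tx, ty) P ∪ (L ++ rest).toFinset)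
      = (fiber land n m (t.1 * m + t.2) \ (P ∪ ((tx, ty) :: rest).toFinset)) \ L.toFinset := by
    ext x; simp only [Finset.mem_sdiff, Finset.mem_union, Finset.mem_insert,
      List.mem_toFinset, List.mem_append, List.mem_cons]
    tauto
  have hcards : L.toFinset.card = L.length := List.toFinset_card_of_nodup hLnd
  have hLle : L.toFinset.card ≤
      (fiber land n m (t.1 * m + t.2) \ (P ∪ ((tx, ty) :: rest).toFinset)).card :=
    Finset.card_le_card hLsub
  have hsd : (((fiber land n m (t.1 * m + t.2) \ (P ∪ ((tx, ty) :: rest).toFinset)) \ L.toFinset).card)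
      = (fiber land n m (t.1 * m + t.2) \ (P ∪ ((tx, ty) :: rest).toFinset)).card
        - L.toFinset.card := by
    rw [Finset.card_sdiff, Finset.inter_eq_left.mpr hLsub]
  have h6' : (L ++ rest).length +
      2 * ((fiber land n m (t.1 * m + t.2) \
        (insert (tx, ty) P ∪ (L ++ rest).toFinset)).card) ≤ f := by
    rw [hMeq, hsd]
    simp only [List.length_append, List.length_cons] at hfuel ⊢
    omega
  obtain ⟨cl, heq, hcl⟩ := IH (L ++ rest) (insert (tx, ty) P) (area + 1) (coords ++ [ty])
    h1' h2' h3' h4' h5' h6'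
  have hcard1 : (insert (tx, ty) P).card = P.card + 1 := Finset.card_insert_of_notMem hcP
  have hlt : P.card < (fiber land n m (t.1 * m + t.2)).card :=
    Finset.card_lt_card ((Finset.ssubset_iff_of_subset hP).mpr ⟨(tx, ty), hcf, hcP⟩)
  have harith : (area + 1) + ((fiber land n m (t.1 * m + t.2)).card - (insert (tx, ty) P).card)
      = area + ((fiber land n m (t.1 * m + t.2)).card - P.card) := by
    rw [hcard1]; omega
  rw [harith] at heq
  have hFP : fiber land n m (t.1 * m + t.2) \ P
      = insert (tx, ty) (fiber land n m (t.1 * m + t.2) \ insert (tx, ty) P) := by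
    ext x
    simp only [Finset.mem_sdiff, Finset.mem_insert]
    by_cases hxc : x = (tx, ty)
    · subst hxc; simp [hcf, hcP]
    · constructor
      · rintro ⟨hx, hxp⟩
        exact Or.inr ⟨hx, fun h => by
          rcases h with h | h
          · exact hxc h
          · exact hxp h⟩
      · rintro (h | ⟨hx, hxp⟩)
        · exact absurd h hxc
        · exact ⟨hx, fun hp => hxp (Or.inr hp)⟩
  refine ⟨cl, heq, ?_⟩
  rw [hcl, hFP, Finset.image_insert]
  ext x
  simp only [Finset.mem_union, List.mem_toFinset, List.mem_append, List.mem_singleton,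
    Finset.mem_insert]
  tauto

lemma loop_nil (land : List (List Int)) (n m : ℕ) (t : ℕ × ℕ)
    (ht : gOne land n m t) (hts : pvOwn land m t.1 t.2 = t.1 * m + t.2)
    (fuel : ℕ) (P : Finset (ℕ × ℕ)) (area : ℕ) (coords : List ℕ)
    (hP : P ⊆ fiber land n m (t.1 * m + t.2))
    (hclosed : ∀ c ∈ P, ∀ d, gStep land n m c d → d ∉ visSet land n m (t.1 * m + t.2) →
      d ∈ P ∨ d ∈ ([] : List (ℕ × ℕ)))
    (ht0 : t ∈ P ∨ t ∈ ([] : List (ℕ × ℕ))) :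
    ∃ cl, pvSearchLoop land n m fuel []
        (visSet land n m (t.1 * m + t.2) ∪ P ∪ ([] : List (ℕ × ℕ)).toFinset) area coords
        = (area + ((fiber land n m (t.1 * m + t.2)).card - P.card), cl,
           visSet land n m (t.1 * m + t.2) ∪ fiber land n m (t.1 * m + t.2))
      ∧ cl.toFinset = coords.toFinset ∪
          (fiber land n m (t.1 * m + t.2) \ P).image Prod.snd := by
  have hPf : P = fiber land n m (t.1 * m + t.2) :=
    popped_complete land n m t ht hts P hP
      (fun c hc d hs hv => by
        rcases hclosed c hc d hs hv with h | h
        · exact h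
        · exact absurd h List.not_mem_nil)
      (by
        rcases ht0 with h | h
        · exact h
        · exact absurd h List.not_mem_nil)
  refine ⟨coords, ?_, ?_⟩
  · cases fuel <;> simp [pvSearchLoop, hPf]
  · simp [hPf]

lemma push_fact (land : List (List Int)) (n m : ℕ) (t : ℕ × ℕ)
    (tx ty : ℕ) (P : Finset (ℕ × ℕ)) (rest : List (ℕ × ℕ))
    (hcf : (tx, ty) ∈ fiber land n m (t.1 * m + t.2)) (d : ℕ × ℕ)
    (hd1 : d = (tx + 1, ty) ∨ d = (tx, ty + 1))
    (hdb : d.1 < n ∧ d.2 < m) (hg : pvGrid land d.1 d.2 = 1)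
    (hnv : d ∉ visSet land n m (t.1 * m + t.2) ∪ P ∪ ((tx, ty) :: rest).toFinset) :
    d ∈ fiber land n m (t.1 * m + t.2) := by
  obtain ⟨hb1, hb2, hg1, ho1⟩ := (mem_fiber land n m _ (tx, ty)).mp hcf
  have honec : gOne land n m (tx, ty) := ⟨hb1, hb2, hg1⟩
  have honed : gOne land n m d := ⟨hdb.1, hdb.2, hg⟩
  have hstep : gStep land n m (tx, ty) d := ⟨honec, honed, hd1⟩
  have hmono := step_mono land n m hstep
  rw [mem_fiber]
  refine ⟨hdb.1, hdb.2, hg, ?_⟩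
  have hnvs : d ∉ visSet land n m (t.1 * m + t.2) := fun h =>
    hnv (Finset.mem_union_left _ (Finset.mem_union_left _ h))
  rw [mem_visSet] at hnvs
  simp only at hmono ho1
  omega

lemma pvLoop_spec (land : List (List Int)) (n m : ℕ) (t : ℕ × ℕ)
    (ht : gOne land n m t) (hts : pvOwn land m t.1 t.2 = t.1 * m + t.2) :
    ∀ (fuel : ℕ) (stack : List (ℕ × ℕ)) (P : Finset (ℕ × ℕ)) (area : ℕ) (coords : List ℕ),
      stack.Nodup →
      (∀ c ∈ stack, c ∈ fiber land n m (t.1 * m + t.2) ∧ c ∉ P) →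
      P ⊆ fiber land n m (t.1 * m + t.2) →
      (∀ c ∈ P, ∀ d, gStep land n m c d → d ∉ visSet land n m (t.1 * m + t.2) →
        d ∈ P ∨ d ∈ stack) →
      (t ∈ P ∨ t ∈ stack) →
      stack.length + 2 * ((fiber land n m (t.1 * m + t.2) \ (P ∪ stack.toFinset)).card) ≤ fuel →
      ∃ cl, pvSearchLoop land n m fuel stack
          (visSet land n m (t.1 * m + t.2) ∪ P ∪ stack.toFinset) area coords
          = (area + ((fiber land n m (t.1 * m + t.2)).card - P.card), cl,
             visSet land n m (t.1 * m + t.2) ∪ fiber land n m (t.1 * m + t.2))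
        ∧ cl.toFinset = coords.toFinset ∪
            (fiber land n m (t.1 * m + t.2) \ P).image Prod.snd := by
  intro fuel
  induction fuel with
  | zero =>
    intro stack P area coords hnd hstk hP hclosed ht0 hfuel
    have hs0 : stack = [] := by
      cases stack with
      | nil => rfl
      | cons a l => exfalso; simp only [List.length_cons] at hfuel; omega
    subst hs0
    exact loop_nil land n m t ht hts 0 P area coords hP hclosed ht0
  | succ f IHf =>
    intro stack P area coords hnd hstk hP hclosed ht0 hfuel
    cases stack with
    | nil => exact loop_nil land n m t ht hts (f + 1) P area coords hP hclosed ht0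
    | cons c rest =>
      obtain ⟨tx, ty⟩ := c
      obtain ⟨hcf, hcP⟩ := hstk (tx, ty) List.mem_cons_self
      obtain ⟨hbx, hby, hgc, hoc⟩ := (mem_fiber land n m _ (tx, ty)).mp hcf
      have hne21 : ((tx, ty + 1) ∈ insert (tx + 1, ty)
          (visSet land n m (t.1 * m + t.2) ∪ P ∪ ((tx, ty) :: rest).toFinset)) ↔
          ((tx, ty + 1) ∈ (visSet land n m (t.1 * m + t.2) ∪ P ∪ ((tx, ty) :: rest).toFinset)) := by
        rw [Finset.mem_insert]
        constructor
        · rintro (h | h)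
          · exfalso; rw [Prod.mk.injEq] at h; omega
          · exact h
        · exact Or.inr
      by_cases hb1 : tx < n - 1 ∧ (tx + 1, ty) ∉
          (visSet land n m (t.1 * m + t.2) ∪ P ∪ ((tx, ty) :: rest).toFinset) ∧
          pvGrid land (tx + 1) ty = 1
      · obtain ⟨hb1a, hb1b, hb1c⟩ := id hb1
        have hfib1 : (tx + 1, ty) ∈ fiber land n m (t.1 * m + t.2) :=
          push_fact land n m t tx ty P rest hcf _ (Or.inl rfl)
            ⟨by dsimp only; omega, by dsimp only; omega⟩ hb1c hb1b
        by_cases hb2 : ty < m - 1 ∧ (tx, ty + 1) ∉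
            (visSet land n m (t.1 * m + t.2) ∪ P ∪ ((tx, ty) :: rest).toFinset) ∧
            pvGrid land tx (ty + 1) = 1
        · obtain ⟨hb2a, hb2b, hb2c⟩ := id hb2
          have hfib2 : (tx, ty + 1) ∈ fiber land n m (t.1 * m + t.2) :=
            push_fact land n m t tx ty P rest hcf _ (Or.inr rfl)
              ⟨by dsimp only; omega, by dsimp only; omega⟩ hb2c hb2b
          rw [pvSearchLoop]
          rw [if_pos hb1]
          have hcnd2 : ty < m - 1 ∧ (tx, ty + 1) ∉ insert (tx + 1, ty)
              (visSet land n m (t.1 * m + t.2) ∪ P ∪ ((tx, ty) :: rest).toFinset) ∧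
              pvGrid land tx (ty + 1) = 1 :=
            ⟨hb2a, fun hv => hb2b (hne21.mp hv), hb2c⟩
          rw [if_pos hcnd2]
          have hveq : insert (tx, ty + 1) (insert (tx + 1, ty)
              (visSet land n m (t.1 * m + t.2) ∪ P ∪ ((tx, ty) :: rest).toFinset))
              = visSet land n m (t.1 * m + t.2) ∪ insert (tx, ty) P ∪
                ([(tx, ty + 1), (tx + 1, ty)] ++ rest).toFinset := by
            ext x; simp
            try tauto
          rw [hveq]
          refine loop_push land n m t ht hts f IHf tx ty rest P area coords
            [(tx, ty + 1), (tx + 1, ty)] hnd hstk hP hclosed ht0 hfuel ?_ ?_ ?_ ?_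
          · intro d hd
            rcases List.mem_cons.mp hd with rfl | hd
            · exact hfib2
            · rcases List.mem_cons.mp hd with rfl | hd
              · exact hfib1
              · exact absurd hd List.not_mem_nil
          · intro d hd
            rcases List.mem_cons.mp hd with rfl | hd
            · exact hb2b
            · rcases List.mem_cons.mp hd with rfl | hd
              · exact hb1b
              · exact absurd hd List.not_mem_nil
          · simp [Prod.mk.injEq]
          · intro d hstep hdnv
            rcases hstep.2.2 with rfl | rfl
            · exact Or.inr (by simp)
            · exact Or.inr (by simp)
        · rw [pvSearchLoop]
          rw [if_pos hb1]
          rw [if_neg (fun hcon : ty < m - 1 ∧ (tx, ty + 1) ∉ insert (tx + 1, ty)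
              (visSet land n m (t.1 * m + t.2) ∪ P ∪ ((tx, ty) :: rest).toFinset) ∧
              pvGrid land tx (ty + 1) = 1 =>
            hb2 ⟨hcon.1, fun hv => hcon.2.1 (hne21.mpr hv), hcon.2.2⟩)]
          have hveq : insert (tx + 1, ty)
              (visSet land n m (t.1 * m + t.2) ∪ P ∪ ((tx, ty) :: rest).toFinset)
              = visSet land n m (t.1 * m + t.2) ∪ insert (tx, ty) P ∪
                ([(tx + 1, ty)] ++ rest).toFinset := by
            ext x; simp
            try tauto
          rw [hveq]
          refine loop_push land n m t ht hts f IHf tx ty rest P area coords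
            [(tx + 1, ty)] hnd hstk hP hclosed ht0 hfuel ?_ ?_ ?_ ?_
          · intro d hd
            rcases List.mem_cons.mp hd with rfl | hd
            · exact hfib1
            · exact absurd hd List.not_mem_nil
          · intro d hd
            rcases List.mem_cons.mp hd with rfl | hd
            · exact hb1b
            · exact absurd hd List.not_mem_nil
          · simp
          · intro d hstep hdnv
            rcases hstep.2.2 with rfl | rfl
            · exact Or.inr (by simp)
            · obtain ⟨hdn, hdm, hdg⟩ := hstep.2.1
              dsimp only at hdn hdm hdg
              by_cases hdU : (tx, ty + 1) ∈
                  (visSet land n m (t.1 * m + t.2) ∪ P ∪ ((tx, ty) :: rest).toFinset)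
              · exact Or.inl hdU
              · exact absurd ⟨by omega, hdU, hdg⟩ hb2
      · by_cases hb2 : ty < m - 1 ∧ (tx, ty + 1) ∉
            (visSet land n m (t.1 * m + t.2) ∪ P ∪ ((tx, ty) :: rest).toFinset) ∧
            pvGrid land tx (ty + 1) = 1
        · obtain ⟨hb2a, hb2b, hb2c⟩ := id hb2
          have hfib2 : (tx, ty + 1) ∈ fiber land n m (t.1 * m + t.2) :=
            push_fact land n m t tx ty P rest hcf _ (Or.inr rfl)
              ⟨by dsimp only; omega, by dsimp only; omega⟩ hb2c hb2b
          rw [pvSearchLoop]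
          rw [if_neg hb1]
          rw [if_pos ⟨hb2a, hb2b, hb2c⟩]
          have hveq : insert (tx, ty + 1)
              (visSet land n m (t.1 * m + t.2) ∪ P ∪ ((tx, ty) :: rest).toFinset)
              = visSet land n m (t.1 * m + t.2) ∪ insert (tx, ty) P ∪
                ([(tx, ty + 1)] ++ rest).toFinset := by
            ext x; simp
            try tauto
          rw [hveq]
          refine loop_push land n m t ht hts f IHf tx ty rest P area coords
            [(tx, ty + 1)] hnd hstk hP hclosed ht0 hfuel ?_ ?_ ?_ ?_
          · intro d hd
            rcases List.mem_cons.mp hd with rfl | hd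
            · exact hfib2
            · exact absurd hd List.not_mem_nil
          · intro d hd
            rcases List.mem_cons.mp hd with rfl | hd
            · exact hb2b
            · exact absurd hd List.not_mem_nil
          · simp
          · intro d hstep hdnv
            rcases hstep.2.2 with rfl | rfl
            · obtain ⟨hdn, hdm, hdg⟩ := hstep.2.1
              dsimp only at hdn hdm hdg
              by_cases hdU : (tx + 1, ty) ∈
                  (visSet land n m (t.1 * m + t.2) ∪ P ∪ ((tx, ty) :: rest).toFinset)
              · exact Or.inl hdU
              · exact absurd ⟨by omega, hdU, hdg⟩ hb1
            · exact Or.inr (by simp)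
        · rw [pvSearchLoop]
          rw [if_neg hb1]
          rw [if_neg hb2]
          have hveq : visSet land n m (t.1 * m + t.2) ∪ P ∪ ((tx, ty) :: rest).toFinset
              = visSet land n m (t.1 * m + t.2) ∪ insert (tx, ty) P ∪
                (([] : List (ℕ × ℕ)) ++ rest).toFinset := by
            ext x; simp
            try tauto
          rw [hveq]
          refine loop_push land n m t ht hts f IHf tx ty rest P area coords
            [] hnd hstk hP hclosed ht0 hfuel ?_ ?_ ?_ ?_
          · intro d hd; exact absurd hd List.not_mem_nil
          · intro d hd; exact absurd hd List.not_mem_nil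
          · exact List.nodup_nil
          · intro d hstep hdnv
            rcases hstep.2.2 with rfl | rfl
            · obtain ⟨hdn, hdm, hdg⟩ := hstep.2.1
              dsimp only at hdn hdm hdg
              by_cases hdU : (tx + 1, ty) ∈
                  (visSet land n m (t.1 * m + t.2) ∪ P ∪ ((tx, ty) :: rest).toFinset)
              · exact Or.inl hdU
              · exact absurd ⟨by omega, hdU, hdg⟩ hb1
            · obtain ⟨hdn, hdm, hdg⟩ := hstep.2.1
              dsimp only at hdn hdm hdg
              by_cases hdU : (tx, ty + 1) ∈
                  (visSet land n m (t.1 * m + t.2) ∪ P ∪ ((tx, ty) :: rest).toFinset)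
              · exact Or.inl hdU
              · exact absurd ⟨by omega, hdU, hdg⟩ hb2

lemma pvSearch_spec (land : List (List Int)) (n m : ℕ) (t : ℕ × ℕ)
    (ht : gOne land n m t) (hts : pvOwn land m t.1 t.2 = t.1 * m + t.2) :
    ∃ cl, pvSearch land n m t.1 t.2 (visSet land n m (t.1 * m + t.2))
        = ((fiber land n m (t.1 * m + t.2)).card, cl, visSet land n m (t.1 * m + t.2 + 1))
      ∧ cl.toFinset = (fiber land n m (t.1 * m + t.2)).image Prod.snd := by
  have htf : t ∈ fiber land n m (t.1 * m + t.2) :=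
    (mem_fiber land n m _ t).mpr ⟨ht.1, ht.2.1, ht.2.2, hts⟩
  have hcard : (fiber land n m (t.1 * m + t.2)).card ≤ n * m := by
    calc (fiber land n m (t.1 * m + t.2)).card ≤ (gridCells n m).card :=
          Finset.card_le_card (Finset.filter_subset _ _)
      _ = n * m := by simp [gridCells]
  have hsub : (fiber land n m (t.1 * m + t.2) \ (∅ ∪ ([t] : List (ℕ × ℕ)).toFinset)).card
      ≤ n * m := le_trans (Finset.card_le_card (Finset.sdiff_subset)) hcard
  obtain ⟨cl, heq, hcl⟩ := pvLoop_spec land n m t ht hts (2 * n * m + 1) [t] ∅ 0 []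
    (List.nodup_singleton t)
    (fun c hc => by
      rcases List.mem_cons.mp hc with rfl | hc
      · exact ⟨htf, Finset.notMem_empty _⟩
      · exact absurd hc List.not_mem_nil)
    (Finset.empty_subset _)
    (fun c hc => absurd hc (Finset.notMem_empty _))
    (Or.inr List.mem_cons_self)
    (by
      simp only [List.length_cons, List.length_nil]
      have h2nm : 2 * n * m = 2 * (n * m) := by ring
      omega)
  have hveq : insert t (visSet land n m (t.1 * m + t.2))
      = visSet land n m (t.1 * m + t.2) ∪ ∅ ∪ ([t] : List (ℕ × ℕ)).toFinset := by
    ext x; simp [or_comm]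
  refine ⟨cl, ?_, by simpa using hcl⟩
  unfold pvSearch
  rw [hveq, heq, visSet_succ]
  simp

lemma widths_fold (a : ℕ) :
    ∀ (cols : List ℕ) (w : List ℕ), cols.Nodup → (∀ x ∈ cols, x < w.length) →
      (cols.foldl (fun w idx => w.set idx (w.getD idx 0 + a)) w).length = w.length ∧
      ∀ j, (cols.foldl (fun w idx => w.set idx (w.getD idx 0 + a)) w).getD j 0
          = w.getD j 0 + (if j ∈ cols then a else 0) := by
  intro cols
  induction cols with
  | nil => intro w _ _; simp
  | cons x xs ih =>
    intro w hnd hlt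
    have hxw : x < w.length := hlt x List.mem_cons_self
    have hnd' : xs.Nodup := (List.nodup_cons.mp hnd).2
    have hxxs : x ∉ xs := (List.nodup_cons.mp hnd).1
    have hlt' : ∀ y ∈ xs, y < (w.set x (w.getD x 0 + a)).length := by
      intro y hy; rw [List.length_set]; exact hlt y (List.mem_cons_of_mem _ hy)
    obtain ⟨ihl, ihd⟩ := ih (w.set x (w.getD x 0 + a)) hnd' hlt'
    constructor
    · simp only [List.foldl_cons]; rw [ihl, List.length_set]
    · intro j
      simp only [List.foldl_cons]
      rw [ihd j]
      by_cases hjx : j = x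
      · rw [hjx, if_neg hxxs, if_pos List.mem_cons_self]
        have hset : (w.set x (w.getD x 0 + a)).getD x 0 = w.getD x 0 + a := by
          rw [List.getD_eq_getElem?_getD, List.getElem?_set_self hxw]
          simp
        omega
      · rw [List.getD_eq_getElem?_getD, List.getElem?_set_ne (fun h => hjx h.symm),
          ← List.getD_eq_getElem?_getD]
        by_cases hjxs : j ∈ xs
        · rw [if_pos hjxs, if_pos (List.mem_cons_of_mem _ hjxs)]
        · rw [if_neg hjxs, if_neg (by
            intro h
            rcases List.mem_cons.mp h with h | h
            · exact hjx h
            · exact hjxs h)]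

lemma ownersCol_mem (land : List (List Int)) (n m j T : ℕ) :
    T ∈ ownersCol land n m j ↔ j ∈ (fiber land n m T).image Prod.snd := by
  simp only [ownersCol, fiber, gridCells, Finset.mem_image, Finset.mem_filter,
    Finset.mem_product, Finset.mem_range]
  constructor
  · rintro ⟨c, ⟨⟨h1, h2⟩, h3, h4⟩, h5⟩
    exact ⟨c, ⟨⟨h1, h2⟩, h4, h5⟩, h3⟩
  · rintro ⟨c, ⟨⟨h1, h2⟩, h3, h4⟩, h5⟩
    exact ⟨c, ⟨⟨h1, h2⟩, h5, h3⟩, h4⟩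

lemma colSum_succ (land : List (List Int)) (n m T j : ℕ) :
    colSum land n m (T + 1) j = colSum land n m T j +
      (if j ∈ (fiber land n m T).image Prod.snd then (fiber land n m T).card else 0) := by
  unfold colSum
  by_cases hT : T ∈ ownersCol land n m j
  · have hfe : (ownersCol land n m j).filter (· < T + 1)
        = insert T ((ownersCol land n m j).filter (· < T)) := by
      ext o
      simp only [Finset.mem_filter, Finset.mem_insert]
      constructor
      · rintro ⟨h1, h2⟩
        rcases Nat.lt_or_ge o T with h | h
        · exact Or.inr ⟨h1, h⟩
        · exact Or.inl (by omega)
      · rintro (rfl | ⟨h1, h2⟩)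
        · exact ⟨hT, by omega⟩
        · exact ⟨h1, by omega⟩
    rw [hfe, Finset.sum_insert (by simp), if_pos ((ownersCol_mem land n m j T).mp hT)]
    omega
  · have hfe : (ownersCol land n m j).filter (· < T + 1)
        = (ownersCol land n m j).filter (· < T) := by
      ext o
      simp only [Finset.mem_filter]
      constructor
      · rintro ⟨h1, h2⟩
        refine ⟨h1, ?_⟩
        rcases Nat.lt_or_ge o T with h | h
        · exact h
        · exact absurd (show o = T by omega) (fun h' => hT (h' ▸ h1))
      · rintro ⟨h1, h2⟩; exact ⟨h1, by omega⟩
    rw [hfe, if_neg (fun h => hT ((ownersCol_mem land n m j T).mpr h))]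
    omega

def InvA (land : List (List Int)) (n m T : ℕ) (st : Finset (ℕ × ℕ) × List ℕ) : Prop :=
  st.1 = visSet land n m T ∧ st.2.length = m ∧
    ∀ j < m, st.2.getD j 0 = colSum land n m T j

lemma scan_cell (land : List (List Int)) (n m i j : ℕ) (hi : i < n) (hj : j < m)
    (st : Finset (ℕ × ℕ) × List ℕ) (hinv : InvA land n m (i * m + j) st) :
    InvA land n m (i * m + j + 1) (pvScanStep land n m st i j) := by
  obtain ⟨hv, hlen, hw⟩ := hinv
  by_cases hcond : pvGrid land i j = 1 ∧ (i, j) ∉ st.1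
  · have hone : gOne land n m (i, j) := ⟨hi, hj, hcond.1⟩
    have hown : pvOwn land m i j = i * m + j := by
      have h1 := pvOwn_le_id land m i j
      have h2 : (i, j) ∉ visSet land n m (i * m + j) := hv ▸ hcond.2
      rw [mem_visSet] at h2
      push_neg at h2
      have h3 := h2 hi hj hcond.1
      dsimp only at h3
      omega
    obtain ⟨cl, heq, hcl⟩ := pvSearch_spec land n m (i, j) hone hown
    dsimp only at heq hcl
    unfold pvScanStep
    rw [if_pos hcond, hv, heq]
    have hndcl : (PySem.Set.ofList cl).Nodup := PySem.Set.nodup_ofList cl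
    have hltcl : ∀ x ∈ PySem.Set.ofList cl, x < st.2.length := by
      intro x hx
      rw [hlen]
      have hx' : x ∈ cl.toFinset := List.mem_toFinset.mpr ((PySem.Set.mem_ofList _ _).mp hx)
      rw [hcl] at hx'
      obtain ⟨c, hcmem, rfl⟩ := Finset.mem_image.mp hx'
      exact ((mem_fiber land n m _ c).mp hcmem).2.1
    obtain ⟨hfl, hfd⟩ := widths_fold ((fiber land n m (i * m + j)).card)
      (PySem.Set.ofList cl) st.2 hndcl hltcl
    refine ⟨rfl, ?_, ?_⟩
    · dsimp only; rw [hfl, hlen]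
    · intro j' hj'
      dsimp only
      rw [hfd j', hw j' hj', colSum_succ]
      have hiff : (j' ∈ PySem.Set.ofList cl) ↔
          j' ∈ (fiber land n m (i * m + j)).image Prod.snd := by
        rw [PySem.Set.mem_ofList, ← List.mem_toFinset, hcl]
      rw [if_congr hiff rfl rfl]
  · have hfe : fiber land n m (i * m + j) = ∅ := by
      apply fiber_id_empty land n m i j hi hj
      rintro ⟨hg1, ho⟩
      have hmem : (i, j) ∈ st.1 := by
        by_contra hnm
        exact hcond ⟨hg1, hnm⟩
      rw [hv, mem_visSet] at hmem
      obtain ⟨_, _, _, hlt⟩ := hmem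
      dsimp only at hlt
      omega
    unfold pvScanStep
    rw [if_neg hcond]
    refine ⟨?_, hlen, ?_⟩
    · rw [hv, visSet_succ, hfe, Finset.union_empty]
    · intro j' hj'
      rw [hw j' hj', colSum_succ, hfe]
      simp

lemma scan_inner (land : List (List Int)) (n m i : ℕ) (hi : i < n) :
    ∀ (len j : ℕ) (st : Finset (ℕ × ℕ) × List ℕ), j + len ≤ m →
      InvA land n m (i * m + j) st →
      InvA land n m (i * m + j + len)
        ((List.range' j len).foldl (fun st j => pvScanStep land n m st i j) st) := by
  intro len
  induction len with
  | zero => intro j st _ hinv; simpa using hinv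
  | succ k ih =>
    intro j st hjk hinv
    rw [List.range'_succ]
    simp only [List.foldl_cons]
    have hstep := scan_cell land n m i j hi (by omega) st hinv
    have hrec := ih (j + 1) _ (by omega) hstep
    rw [show i * m + j + (k + 1) = i * m + (j + 1) + k from by omega]
    exact hrec

lemma scan_outer (land : List (List Int)) (n m : ℕ) :
    ∀ (len i : ℕ) (st : Finset (ℕ × ℕ) × List ℕ), i + len ≤ n →
      InvA land n m (i * m) st →
      InvA land n m ((i + len) * m)
        ((List.range' i len).foldl
          (fun st i => (List.range m).foldl (fun st j => pvScanStep land n m st i j) st) st) := by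
  intro len
  induction len with
  | zero => intro i st _ hinv; simpa using hinv
  | succ k ih =>
    intro i st hik hinv
    rw [List.range'_succ]
    simp only [List.foldl_cons]
    have hrow : InvA land n m (i * m + 0 + m)
        ((List.range' 0 m).foldl (fun st j => pvScanStep land n m st i j) st) :=
      scan_inner land n m i (by omega) m 0 st (by omega)
        (by rw [show i * m + 0 = i * m from by omega]; exact hinv)
    rw [← List.range_eq_range'] at hrow
    have hrec := ih (i + 1) _ (by omega)
      (by rw [show (i + 1) * m = i * m + 0 + m from by ring]; exact hrow)
    rw [show (i + (k + 1)) * m = (i + 1 + k) * m from by ring]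
    exact hrec

def InvB (land : List (List Int)) (n m T : ℕ)
    (st : PySem.Dict (ℕ × ℕ) ℕ × PySem.Dict ℕ ℕ) : Prop :=
  (∀ i j : ℕ, st.1.get? (i, j) =
      if i < n ∧ j < m ∧ pvGrid land i j = 1 ∧ i * m + j < T then some (pvOwn land m i j)
      else none) ∧
  (∀ o : ℕ, st.2.getD o 0 =
      ((fiber land n m o).filter (fun c => c.1 * m + c.2 < T)).card)

lemma step_min (o1 : ℕ) (cond : Prop) [Decidable cond] (v : ℕ) :
    (match (if cond then some v else none : Option ℕ) with
      | some w => if w < o1 then w else o1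
      | none => o1) = if cond ∧ v < o1 then v else o1 := by
  by_cases h : cond <;> simp [h]

lemma alt_cell (land : List (List Int)) (n m i j : ℕ) (hi : i < n) (hj : j < m)
    (st : PySem.Dict (ℕ × ℕ) ℕ × PySem.Dict ℕ ℕ) (hinv : InvB land n m (i * m + j) st) :
    InvB land n m (i * m + j + 1) (pvAltCell land m st i j) := by
  obtain ⟨hget, hsize⟩ := hinv
  have hm : 0 < m := by omega
  by_cases hg : pvGrid land i j = 1
  · have hup : st.1.get? (i - 1, j) =
        (if 0 < i ∧ pvGrid land (i - 1) j = 1 then some (pvOwn land m (i - 1) j) else none) := by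
      rw [hget]
      by_cases h0i : 0 < i
      · have hlt : (i - 1) * m + j < i * m + j := by
          have := (Nat.mul_lt_mul_right hm).mpr (show i - 1 < i by omega)
          omega
        by_cases hgu : pvGrid land (i - 1) j = 1
        · rw [if_pos ⟨by omega, hj, hgu, hlt⟩, if_pos ⟨h0i, hgu⟩]
        · rw [if_neg (fun h => hgu h.2.2.1), if_neg (fun h => hgu h.2)]
      · have h0 : i = 0 := by omega
        subst h0
        rw [if_neg (fun h => by have := h.2.2.2; omega),
          if_neg (fun h => by have := h.1; omega)]
    have hleft : st.1.get? (i, j - 1) =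
        (if 0 < j ∧ pvGrid land i (j - 1) = 1 then some (pvOwn land m i (j - 1)) else none) := by
      rw [hget]
      by_cases h0j : 0 < j
      · by_cases hgl : pvGrid land i (j - 1) = 1
        · rw [if_pos ⟨hi, by omega, hgl, by omega⟩, if_pos ⟨h0j, hgl⟩]
        · rw [if_neg (fun h => hgl h.2.2.1), if_neg (fun h => hgl h.2)]
      · have h0 : j = 0 := by omega
        subst h0
        rw [if_neg (fun h => by have := h.2.2.2; omega),
          if_neg (fun h => by have := h.1; omega)]
    have hvalq : pvAltCell land m st i j =
        (st.1.insert (i, j) (pvOwn land m i j),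
         st.2.insert (pvOwn land m i j) (st.2.getD (pvOwn land m i j) 0 + 1)) := by
      unfold pvAltCell
      rw [if_pos hg]
      simp only [hup, hleft, step_min]
      have hval : (if 0 < j then
          if (0 < j ∧ pvGrid land i (j - 1) = 1) ∧ pvOwn land m i (j - 1) <
              (if 0 < i then
                if (0 < i ∧ pvGrid land (i - 1) j = 1) ∧ pvOwn land m (i - 1) j < i * m + j
                then pvOwn land m (i - 1) j else i * m + j
              else i * m + j)
          then pvOwn land m i (j - 1)
          else (if 0 < i then
                if (0 < i ∧ pvGrid land (i - 1) j = 1) ∧ pvOwn land m (i - 1) j < i * m + j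
                then pvOwn land m (i - 1) j else i * m + j
              else i * m + j)
        else (if 0 < i then
                if (0 < i ∧ pvGrid land (i - 1) j = 1) ∧ pvOwn land m (i - 1) j < i * m + j
                then pvOwn land m (i - 1) j else i * m + j
              else i * m + j)) = pvOwn land m i j := by
        conv_rhs => rw [pvOwn]
        by_cases h0i : 0 < i <;> by_cases h0j : 0 < j <;>
          simp only [h0i, h0j, if_true, if_false, dif_pos, dif_neg, not_false_iff,
            true_and, and_true, if_pos, if_neg] <;>
          split_ifs <;> first | rfl | omega | tauto
      rw [hval]
    rw [hvalq]
    constructor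
    · intro i' j'
      dsimp only
      rw [PySem.Dict.get?_insert]
      by_cases hij : (i', j') = (i, j)
      · rw [if_pos hij]
        injection hij with hii hjj
        subst hii; subst hjj
        rw [if_pos ⟨hi, hj, hg, by omega⟩]
      · rw [if_neg hij, hget]
        by_cases hb : i' < n ∧ j' < m ∧ pvGrid land i' j' = 1
        · obtain ⟨hb1, hb2, hb3⟩ := hb
          have hne : i' * m + j' ≠ i * m + j := fun h =>
            hij (idc_inj m (c := (i', j')) (d := (i, j)) hb2 hj h)
          by_cases hlt : i' * m + j' < i * m + j
          · rw [if_pos ⟨hb1, hb2, hb3, hlt⟩, if_pos ⟨hb1, hb2, hb3, by omega⟩]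
          · rw [if_neg (fun h => by have := h.2.2.2; omega),
              if_neg (fun h => by have := h.2.2.2; omega)]
        · rw [if_neg (fun h => hb ⟨h.1, h.2.1, h.2.2.1⟩),
            if_neg (fun h => hb ⟨h.1, h.2.1, h.2.2.1⟩)]
    · intro o
      dsimp only
      rw [PySem.Dict.getD_insert]
      have hself : (i, j) ∈ fiber land n m (pvOwn land m i j) :=
        (mem_fiber land n m _ (i, j)).mpr ⟨hi, hj, hg, rfl⟩
      by_cases ho : o = pvOwn land m i j
      · rw [if_pos ho, ho]
        have hfe : (fiber land n m (pvOwn land m i j)).filter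
              (fun c => c.1 * m + c.2 < i * m + j + 1)
            = insert (i, j) ((fiber land n m (pvOwn land m i j)).filter
              (fun c => c.1 * m + c.2 < i * m + j)) := by
          ext c
          simp only [Finset.mem_filter, Finset.mem_insert]
          constructor
          · rintro ⟨hcf, hlt⟩
            by_cases hceq : c = (i, j)
            · exact Or.inl hceq
            · refine Or.inr ⟨hcf, ?_⟩
              have hcb := (mem_fiber land n m _ c).mp hcf
              have hne : c.1 * m + c.2 ≠ i * m + j := fun h =>
                hceq (idc_inj m (c := c) (d := (i, j)) hcb.2.1 hj h)
              omega
          · rintro (rfl | ⟨hcf, hlt⟩)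
            · exact ⟨hself, by dsimp only; omega⟩
            · exact ⟨hcf, by omega⟩
        rw [hfe, Finset.card_insert_of_notMem (by
          simp only [Finset.mem_filter]
          rintro ⟨_, hlt⟩
          omega)]
        rw [hsize]
      · rw [if_neg ho, hsize]
        have hfe : (fiber land n m o).filter (fun c => c.1 * m + c.2 < i * m + j + 1)
            = (fiber land n m o).filter (fun c => c.1 * m + c.2 < i * m + j) := by
          ext c
          simp only [Finset.mem_filter]
          constructor
          · rintro ⟨hcf, hlt⟩
            refine ⟨hcf, ?_⟩
            have hcb := (mem_fiber land n m _ c).mp hcf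
            have hne : c.1 * m + c.2 ≠ i * m + j := by
              intro h
              have hce : c = (i, j) := idc_inj m (c := c) (d := (i, j)) hcb.2.1 hj h
              rw [hce] at hcb
              exact ho (hcb.2.2.2.symm)
            omega
          · rintro ⟨hcf, hlt⟩; exact ⟨hcf, by omega⟩
        rw [hfe]
  · unfold pvAltCell
    rw [if_neg hg]
    constructor
    · intro i' j'
      rw [hget]
      by_cases hb : i' < n ∧ j' < m ∧ pvGrid land i' j' = 1
      · obtain ⟨hb1, hb2, hb3⟩ := hb
        have hne : i' * m + j' ≠ i * m + j := by
          intro h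
          have hce : (i', j') = (i, j) := idc_inj m (c := (i', j')) (d := (i, j)) hb2 hj h
          injection hce with hii hjj
          subst hii; subst hjj
          exact hg hb3
        by_cases hlt : i' * m + j' < i * m + j
        · rw [if_pos ⟨hb1, hb2, hb3, hlt⟩, if_pos ⟨hb1, hb2, hb3, by omega⟩]
        · rw [if_neg (fun h => by have := h.2.2.2; omega),
            if_neg (fun h => by have := h.2.2.2; omega)]
      · rw [if_neg (fun h => hb ⟨h.1, h.2.1, h.2.2.1⟩),
          if_neg (fun h => hb ⟨h.1, h.2.1, h.2.2.1⟩)]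
    · intro o
      rw [hsize]
      have hfe : (fiber land n m o).filter (fun c => c.1 * m + c.2 < i * m + j + 1)
          = (fiber land n m o).filter (fun c => c.1 * m + c.2 < i * m + j) := by
        ext c
        simp only [Finset.mem_filter]
        constructor
        · rintro ⟨hcf, hlt⟩
          refine ⟨hcf, ?_⟩
          have hcb := (mem_fiber land n m _ c).mp hcf
          have hne : c.1 * m + c.2 ≠ i * m + j := by
            intro h
            have hce : c = (i, j) := idc_inj m (c := c) (d := (i, j)) hcb.2.1 hj h
            rw [hce] at hcb
            exact hg hcb.2.2.1
          omega
        · rintro ⟨hcf, hlt⟩; exact ⟨hcf, by omega⟩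
      rw [hfe]

lemma alt_inner (land : List (List Int)) (n m i : ℕ) (hi : i < n) :
    ∀ (len j : ℕ) (st : PySem.Dict (ℕ × ℕ) ℕ × PySem.Dict ℕ ℕ), j + len ≤ m →
      InvB land n m (i * m + j) st →
      InvB land n m (i * m + j + len)
        ((List.range' j len).foldl (fun st j => pvAltCell land m st i j) st) := by
  intro len
  induction len with
  | zero => intro j st _ hinv; simpa using hinv
  | succ k ih =>
    intro j st hjk hinv
    rw [List.range'_succ]
    simp only [List.foldl_cons]
    have hstep := alt_cell land n m i j hi (by omega) st hinv
    have hrec := ih (j + 1) _ (by omega) hstep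
    rw [show i * m + j + (k + 1) = i * m + (j + 1) + k from by omega]
    exact hrec

lemma alt_outer (land : List (List Int)) (n m : ℕ) :
    ∀ (len i : ℕ) (st : PySem.Dict (ℕ × ℕ) ℕ × PySem.Dict ℕ ℕ), i + len ≤ n →
      InvB land n m (i * m) st →
      InvB land n m ((i + len) * m)
        ((List.range' i len).foldl
          (fun st i => (List.range m).foldl (fun st j => pvAltCell land m st i j) st) st) := by
  intro len
  induction len with
  | zero => intro i st _ hinv; simpa using hinv
  | succ k ih =>
    intro i st hik hinv
    rw [List.range'_succ]
    simp only [List.foldl_cons]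
    have hrow : InvB land n m (i * m + 0 + m)
        ((List.range' 0 m).foldl (fun st j => pvAltCell land m st i j) st) :=
      alt_inner land n m i (by omega) m 0 st (by omega)
        (by rw [show i * m + 0 = i * m from by omega]; exact hinv)
    rw [← List.range_eq_range'] at hrow
    have hrec := ih (i + 1) _ (by omega)
      (by rw [show (i + 1) * m = i * m + 0 + m from by ring]; exact hrow)
    rw [show (i + (k + 1)) * m = (i + 1 + k) * m from by ring]
    exact hrec

lemma idc_lt_grid (i n m j : ℕ) (hi : i < n) (hj : j < m) : i * m + j < n * m := by
  have h1 : (i + 1) * m ≤ n * m := Nat.mul_le_mul_right m (by omega)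
  have h2 : (i + 1) * m = i * m + m := by ring
  omega

lemma A_final (land : List (List Int)) (n m : ℕ)
    (hn : n = land.length) (hm : m = (land.getD 0 []).length) :
    solution land =
      (((List.range m).foldl (fun b j => max b (colSum land n m (n * m) j)) 0 : ℕ) : Int) := by
  have h0 : InvA land n m 0 ((∅ : Finset (ℕ × ℕ)), List.replicate m 0) := by
    refine ⟨by ext c; simp [mem_visSet], by simp, ?_⟩
    intro j hj
    have hfil : (ownersCol land n m j).filter (· < 0) = ∅ := by ext o; simp
    simp [colSum, hfil]
  have hfin := scan_outer land n m n 0 ((∅ : Finset (ℕ × ℕ)), List.replicate m 0)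
    (by omega) (by simpa using h0)
  rw [← List.range_eq_range'] at hfin
  rw [show (0 + n) * m = n * m from by ring] at hfin
  obtain ⟨hv, hlen, hw⟩ := hfin
  simp only [solution]
  rw [← hn, ← hm]
  have hmap : ((List.range n).foldl
      (fun st i => (List.range m).foldl (fun st j => pvScanStep land n m st i j) st)
      ((∅ : Finset (ℕ × ℕ)), List.replicate m 0)).2
      = (List.range m).map (fun j => colSum land n m (n * m) j) := by
    apply List.ext_getElem
    · rw [hlen]; simp
    · intro k h1 h2
      rw [List.getElem_map, List.getElem_range]
      rw [← List.getD_eq_getElem _ 0 h1]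
      exact hw k (by rw [← hlen]; exact h1)
  rw [hmap, List.foldl_map]

lemma B_final (land : List (List Int)) (n m : ℕ)
    (hn : n = land.length) (hm : m = (land.getD 0 []).length) :
    solution_alt land =
      (((List.range m).foldl (fun b j => max b (colSum land n m (n * m) j)) 0 : ℕ) : Int) := by
  have h0 : InvB land n m 0 (PySem.Dict.empty, PySem.Dict.empty) := by
    constructor
    · intro i' j'
      rw [PySem.Dict.get?_empty]
      rw [if_neg (fun h => by have := h.2.2.2; omega)]
    · intro o
      rw [PySem.Dict.getD_empty]
      have hfil : (fiber land n m o).filter (fun c => c.1 * m + c.2 < 0) = ∅ := by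
        ext c; simp
      rw [hfil]; simp
  have hfin := alt_outer land n m n 0 (PySem.Dict.empty, PySem.Dict.empty)
    (by omega) (by simpa using h0)
  rw [← List.range_eq_range'] at hfin
  rw [show (0 + n) * m = n * m from by ring] at hfin
  simp only [solution_alt]
  rw [← hn, ← hm]
  set os := (List.range n).foldl
      (fun st i => (List.range m).foldl (fun st j => pvAltCell land m st i j) st)
      (PySem.Dict.empty, PySem.Dict.empty) with hos
  obtain ⟨hget, hsize⟩ := hfin
  have hsizefull : ∀ o : ℕ, os.2.getD o 0 = (fiber land n m o).card := by
    intro o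
    rw [hsize o]
    congr 1
    apply Finset.filter_true_of_mem
    intro c hc
    obtain ⟨h1, h2, _, _⟩ := (mem_fiber land n m o c).mp hc
    exact idc_lt_grid c.1 n m c.2 h1 h2
  have hSj : ∀ j : ℕ, j < m →
      (((PySem.Set.ofList ((List.range n).filterMap (fun i => os.1.get? (i, j)))).map
        (fun o => os.2.getD o 0)).sum) = colSum land n m (n * m) j := by
    intro j hj
    have hmemL : ∀ o : ℕ,
        (o ∈ (List.range n).filterMap (fun i => os.1.get? (i, j)) ↔
          o ∈ ownersCol land n m j) := by
      intro o
      rw [List.mem_filterMap]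
      constructor
      · rintro ⟨i, hi, hgo⟩
        rw [List.mem_range] at hi
        rw [hget i j] at hgo
        by_cases hc : i < n ∧ j < m ∧ pvGrid land i j = 1 ∧ i * m + j < n * m
        · rw [if_pos hc] at hgo
          injection hgo with hgo
          rw [ownersCol, Finset.mem_image]
          exact ⟨(i, j), Finset.mem_filter.mpr
            ⟨Finset.mem_product.mpr ⟨Finset.mem_range.mpr hi, Finset.mem_range.mpr hj⟩,
              rfl, hc.2.2.1⟩, hgo⟩
        · rw [if_neg hc] at hgo; exact absurd hgo (by simp)
      · intro ho
        rw [ownersCol, Finset.mem_image] at ho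
        obtain ⟨c, hcmem, hco⟩ := ho
        obtain ⟨ci, cj⟩ := c
        obtain ⟨hcg, hcj, hcg1⟩ := Finset.mem_filter.mp hcmem
        obtain ⟨hci, hcj'⟩ := Finset.mem_product.mp hcg
        rw [Finset.mem_range] at hci hcj'
        dsimp only at hcj hcg1 hco
        rw [hcj] at hcg1 hco
        refine ⟨ci, List.mem_range.mpr hci, ?_⟩
        rw [hget ci j, if_pos ⟨hci, hj, hcg1, idc_lt_grid ci n m j hci hj⟩, hco]
    have hnod := PySem.Set.nodup_ofList ((List.range n).filterMap (fun i => os.1.get? (i, j)))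
    have htf : (PySem.Set.ofList ((List.range n).filterMap
        (fun i => os.1.get? (i, j)))).toFinset = ownersCol land n m j := by
      ext o
      rw [List.mem_toFinset, PySem.Set.mem_ofList, hmemL o]
    rw [← List.sum_toFinset _ hnod, htf]
    have hfull : (ownersCol land n m j).filter (· < n * m) = ownersCol land n m j := by
      apply Finset.filter_true_of_mem
      intro o ho
      rw [ownersCol, Finset.mem_image] at ho
      obtain ⟨c, hcmem, hco⟩ := ho
      obtain ⟨hcg, hcj, hcg1⟩ := Finset.mem_filter.mp hcmem
      obtain ⟨hci, hcj'⟩ := Finset.mem_product.mp hcg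
      rw [Finset.mem_range] at hci hcj'
      have h1 := pvOwn_le_id land m c.1 c.2
      have h2 := idc_lt_grid c.1 n m c.2 hci hcj'
      omega
    rw [colSum, hfull]
    apply Finset.sum_congr rfl
    intro o _
    exact hsizefull o
  apply congrArg
  apply PySem.List.foldl_congr_mem
  intro acc x hx
  rw [hSj x (List.mem_range.mp hx)]

-- the two ports agree on every input
lemma ports_equal (land : List (List Int)) : solution land = solution_alt land := by
  rw [A_final land land.length ((land.getD 0 []).length) rfl rfl,
    B_final land land.length ((land.getD 0 []).length) rfl rfl]

-- ===== VERDICT (by name: the statement is the Claim_ definition above) =====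
theorem solution_spec : Claim_equal_solution := by
  intro land _ _
  unfold Spec_solution
  exact ports_equal land
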